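-- pv_equiv track=rewrite | github.com/codemicro/adventOfCode | challenges/2025/06-trashCompactor/main.py | parse
-- ===== SOURCE A (Python) =====
-- import itertools
--
-- def parse(instr: str) -> list[tuple[str, list[str]]]:
--     data = instr.splitlines()
--     operations = data[-1]
--     data = data[:-1]
--
--     breakpoints = []
--     for i, char in enumerate(operations):
--         if char != " ":
--             breakpoints.append(i)
--
--     res = []
--     for (bp_start, bp_end) in itertools.pairwise(breakpoints + [None]):
--         acc = []
--         for line in data:
--             if bp_end is None:
--                 acc.append(line[bp_start:])
--             else:
--                 acc.append(line[bp_start : bp_end - 1])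
--         res.append((operations[bp_start], acc))
--
--     return res
-- ===== SOURCE B (Python) =====
-- def parse(instr: str) -> list[tuple[str, list[str]]]:
--     lines = instr.splitlines()
--     if not lines:
--         return []
--     ops = lines[-1]
--     data = lines[:-1]
--     bps = [i for i, c in enumerate(ops) if c != " "]
--     if not bps:
--         return []
--     # row-major: split every line into its fields, then transpose to columns
--     rows = [[line[s:e - 1] for s, e in zip(bps, bps[1:])] + [line[bps[-1]:]] for line in data]
--     cols = [[row[j] for row in rows] for j in range(len(bps))]
--     return [(ops[i], col) for i, col in zip(bps, cols)]
-- ===== Notes on version B (the rewrite author's own statement) =====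
-- stated objective: alternative
-- what changed: A folds over breakpoint pairs with an inner scan over all data lines per column; B splits each line once into its fields (row-major), then transposes by index to columns, pairing each with its operation character.
import Mathlib
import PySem

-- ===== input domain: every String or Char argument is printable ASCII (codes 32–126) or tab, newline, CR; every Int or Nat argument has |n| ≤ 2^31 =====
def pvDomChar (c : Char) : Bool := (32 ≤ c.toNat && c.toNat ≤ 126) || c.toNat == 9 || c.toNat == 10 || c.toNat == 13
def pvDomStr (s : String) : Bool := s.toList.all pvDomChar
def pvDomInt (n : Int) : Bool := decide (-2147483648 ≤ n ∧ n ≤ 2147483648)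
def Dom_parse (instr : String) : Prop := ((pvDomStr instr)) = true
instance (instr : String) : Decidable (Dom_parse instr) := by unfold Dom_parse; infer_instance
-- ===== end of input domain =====

-- B re-decomposes A: instead of folding over breakpoint pairs with an inner scan of the data
-- lines, B splits each line once into its fields and transposes the row-major matrix to columns.


-- ===== PORT A =====
def parse (instr : String) : List (String × List String) :=
  let data := PySem.Str.splitlines instr
  let operations := PySem.List.pyGetD data (-1) ""    -- data[-1]; Pre_ excludes the empty input, where Python raises IndexError
  let data2 := PySem.List.slice data none (some (-1))
  let breakpoints : List Int := (PySem.List.enumerate operations.toList).foldl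
      (fun bps ic => if ic.2 != ' ' then bps ++ [ic.1] else bps) []
  -- itertools.pairwise(breakpoints + [None]) = zip of the list with its shifted self
  let pairs := breakpoints.zip (breakpoints.tail.map some ++ [(none : Option Int)])
  pairs.foldl (fun res p =>
    let acc := data2.foldl (fun acc line =>
      match p.2 with
      | none => acc ++ [PySem.Str.slice line (some p.1) none]
      | some bp_end => acc ++ [PySem.Str.slice line (some p.1) (some (bp_end - 1))]) []
    res ++ [(String.ofList [PySem.List.pyGetD operations.toList p.1 ' '], acc)]) []

-- ===== PORT B =====
def parse_alt (instr : String) : List (String × List String) :=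
  let lines := PySem.Str.splitlines instr
  if lines = [] then []
  else
    let ops := PySem.List.pyGetD lines (-1) ""
    let data := PySem.List.slice lines none (some (-1))
    let bps : List Int := (PySem.List.enumerate ops.toList).filterMap
        (fun ic => if ic.2 != ' ' then some ic.1 else none)
    if bps = [] then []
    else
      let rows := data.map (fun line =>
        (bps.zip (PySem.List.slice bps (some 1) none)).map
            (fun se => PySem.Str.slice line (some se.1) (some (se.2 - 1)))
          ++ [PySem.Str.slice line (some (PySem.List.pyGetD bps (-1) 0)) none])
      let cols := (PySem.List.pyRange 0 (bps.length : Int) 1).map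
        (fun j => rows.map (fun row => PySem.List.pyGetD row j ""))
      (bps.zip cols).map (fun icol => (String.ofList [PySem.List.pyGetD ops.toList icol.1 ' '], icol.2))

-- ===== PRECONDITION & SPEC =====
-- Pre_ excludes exactly the empty string, on which A raises IndexError (data[-1] of no lines).
def Pre_parse (instr : String) : Prop := instr ≠ ""
instance (instr : String) : Decidable (Pre_parse instr) := by unfold Pre_parse; infer_instance
def pvWitness_parse : String := "1 2\n+ *"

def Spec_parse (instr : String) (out : List (String × List String)) : Prop := out = parse_alt instr
instance (instr : String) (out : List (String × List String)) : Decidable (Spec_parse instr out) := by unfold Spec_parse; infer_instance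

-- ===== CLAIM (what is proved, stated in full; the proofs are below) =====
def Claim_equal_parse : Prop := ∀ (instr : String), Dom_parse instr → Pre_parse instr → Spec_parse instr (parse instr)

-- ===== LEMMAS AND PROOFS =====

theorem filterMap_if_eq (l : List (Int × Char)) (p : Int × Char → Bool) :
    l.filterMap (fun ic => if p ic then some ic.1 else none) = (l.filter p).map (·.1) := by
  induction l with
  | nil => rfl
  | cons a l ih => by_cases h : p a <;> simp [h, ih]

theorem parse_eq_alt (instr : String) : parse instr = parse_alt instr := by
  simp only [parse, parse_alt]
  by_cases hL : PySem.Str.splitlines instr = []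
  · rw [hL]; decide
  · rw [if_neg hL]
    rw [PySem.List.foldl_append_if (fun (ic : Int × Char) => ic.2 != ' ') (fun (ic : Int × Char) => ic.1),
        filterMap_if_eq _ (fun (ic : Int × Char) => ic.2 != ' '), List.nil_append]
    set ops := PySem.List.pyGetD (PySem.Str.splitlines instr) (-1) "" with hops
    set data := PySem.List.slice (PySem.Str.splitlines instr) none (some (-1)) with hdata
    set bps : List Int := ((PySem.List.enumerate ops.toList).filter (fun ic => ic.2 != ' ')).map (fun ic => ic.1) with hbps
    by_cases hb : bps = []
    · simp [hb]
    · rw [if_neg hb]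
      rw [PySem.List.foldl_append_singleton_eq_map
            (fun (p : Int × Option Int) =>
              ((String.ofList [PySem.List.pyGetD ops.toList p.1 ' '],
                List.foldl (fun acc line =>
                  match p.2 with
                  | none => acc ++ [PySem.Str.slice line (some p.1) none]
                  | some bp_end => acc ++ [PySem.Str.slice line (some p.1) (some (bp_end - 1))]) [] data)
               : String × List String)),
          List.nil_append]
      have hn : 0 < bps.length := List.length_pos_of_ne_nil hb
      rw [PySem.List.pyRange_zero_natCast, PySem.List.slice_from_one]
      apply List.ext_getElem
      · simp; omega
      · intro j hj hj'
        simp only [List.getElem_map, List.getElem_zip, List.map_map]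
        have hjn : j < bps.length := by simp at hj; omega
        simp only [List.getElem_range]
        congr 1
        by_cases hj2 : j + 1 < bps.length
        · rw [List.getElem_append_left (by simp [List.length_tail]; omega)]
          simp only [List.getElem_map, List.getElem_tail]
          rw [PySem.List.foldl_append_singleton_eq_map
                (fun line => PySem.Str.slice line (some bps[j]) (some (bps[j+1] - 1))),
              List.nil_append]
          apply List.map_congr_left
          intro line _
          simp only [Function.comp_apply]
          rw [PySem.List.pyGetD_natCast]
          rw [List.getD_eq_getElem _ _ (by simp [List.length_tail]; omega)]
          rw [List.getElem_append_left (by simp [List.length_tail]; omega)]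
          simp [List.getElem_tail]
        · have hje : j = bps.length - 1 := by omega
          subst hje
          rw [List.getElem_append_right (by simp [List.length_tail])]
          have h0 : bps.length - 1 - (List.map some bps.tail).length = 0 := by
            simp [List.length_tail]
          simp only [h0, List.getElem_cons_zero]
          rw [PySem.List.foldl_append_singleton_eq_map
                (fun line => PySem.Str.slice line (some bps[bps.length - 1]) none),
              List.nil_append]
          apply List.map_congr_left
          intro line _
          simp only [Function.comp_apply]
          rw [PySem.List.pyGetD_natCast]
          rw [List.getD_eq_getElem _ _ (by simp [List.length_tail])]
          rw [List.getElem_append_right (by simp [List.length_tail])]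
          have h1 : bps.length - 1 -
              (List.map (fun se => PySem.Str.slice line (some se.1) (some (se.2 - 1))) (bps.zip bps.tail)).length = 0 := by
            simp [List.length_tail]
          simp only [h1, List.getElem_cons_zero]
          rw [PySem.List.pyGetD_neg_one _ _ hb, List.getLast_eq_getElem]

-- ===== VERDICT (by name: the statement is the Claim_ definition above) =====
theorem parse_spec : Claim_equal_parse := by
  intro instr _ _
  unfold Spec_parse
  exact parse_eq_alt instr
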